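-- pv_equiv track=rewrite | github.com/Galaktikkon/data-structures-algorithims | all/zestaw_dynamiki/zad9/zad9k.py | prom
-- ===== SOURCE A (Python) =====
-- def prom(P, g, d):
--     n = len(P)
--     F = [[[-1 for _ in range(d+1)] for _ in range(g+1)] for _ in range(n)]
--
--     def rec_prom(F, P, g, d, i):
--         if i == len(P):
--             return 0
--
--         if g < P[i] and d < P[i]:
--             F[i][g][d] = 0
--             return 0
--
--         if F[i][g][d] != -1:
--             return F[i][g][d]
--         if P[i] > g:
--             F[i][g][d] = rec_prom(F, P, g, d-P[i], i+1)+1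
--         elif P[i] > d:
--             F[i][g][d] = rec_prom(F, P, g-P[i], d, i+1)+1
--         else:
--             F[i][g][d] = max(rec_prom(F, P, g-P[i], d, i+1),
--                              rec_prom(F, P, g, d-P[i], i+1))+1
--
--         return F[i][g][d]
--
--     count = rec_prom(F, P, g, d, 0)
--     i, a, b = 0, g, d
--     board_g = []
--     board_d = []
--     flag = -1
--     while i < len(P) and (a >= P[i] or P[i] <= b):
--
--         if a < P[i]:
--             p1 = 0
--             p2 = 1
--         elif b < P[i]:
--             p1 = 1
--             p2 = 0
--         else:
--             p1 = rec_prom(F, P, a-P[i], b, i+1)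
--             p2 = rec_prom(F, P, a, b-P[i], i+1)
--
--         if p1 > p2:
--             if i == count-1:
--                 flag = 0
--             board_g += [i]
--             a -= P[i]
--         else:
--             if i == count-1:
--                 flag = 1
--             board_d += [i]
--             b -= P[i]
--         i += 1
--     if flag:
--         return board_d
--     else:
--         return board_g
-- ===== SOURCE B (Python) =====
-- def prom(P, g, d):
--     n = len(P)
--     # bottom-up DP table built by folding over P from the right:
--     # F[j] is the row for suffix index j, F[n] is all zeros
--     F = [[[0] * (d + 1) for _ in range(g + 1)]]
--     for p in reversed(P):
--         nxt = F[0]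
--         row = []
--         for a in range(g + 1):
--             r = []
--             for b in range(d + 1):
--                 opts = []
--                 if p <= a:
--                     opts.append(nxt[a - p][b])
--                 if p <= b:
--                     opts.append(nxt[a][b - p])
--                 r.append(max(opts) + 1 if opts else 0)
--             row.append(r)
--         F.insert(0, row)
--     count = F[0][g][d]
--     # record the greedy choices first, then select/filter in separate passes
--     choices = []
--     i, a, b = 0, g, d
--     while i < n and (a >= P[i] or P[i] <= b):
--         p = P[i]
--         take_g = a >= p and (b < p or F[i + 1][a - p][b] > F[i + 1][a][b - p])
--         choices.append((i, take_g))
--         if take_g: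
--             a -= p
--         else:
--             b -= p
--         i += 1
--     if any(i == count - 1 and tg for i, tg in choices):
--         return [i for i, tg in choices if tg]
--     return [i for i, tg in choices if not tg]
-- ===== Notes on version B (the rewrite author's own statement) =====
-- stated objective: alternative
-- what changed: The memoized top-down recursion and the flag-driven while-loop are replaced by a bottom-up DP table folded from the right (each cell as max over a list of feasible options) and a reconstruction that first records the (index, bin) choices and then selects/filters them in separate passes instead of maintaining two boards and a flag.
-- outside the precondition, e.g. on prom([], -1, -1): A returns [], B raises IndexError; on prom([-1], 0, 0): A returns [0], B raises IndexError
import Mathlib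
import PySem

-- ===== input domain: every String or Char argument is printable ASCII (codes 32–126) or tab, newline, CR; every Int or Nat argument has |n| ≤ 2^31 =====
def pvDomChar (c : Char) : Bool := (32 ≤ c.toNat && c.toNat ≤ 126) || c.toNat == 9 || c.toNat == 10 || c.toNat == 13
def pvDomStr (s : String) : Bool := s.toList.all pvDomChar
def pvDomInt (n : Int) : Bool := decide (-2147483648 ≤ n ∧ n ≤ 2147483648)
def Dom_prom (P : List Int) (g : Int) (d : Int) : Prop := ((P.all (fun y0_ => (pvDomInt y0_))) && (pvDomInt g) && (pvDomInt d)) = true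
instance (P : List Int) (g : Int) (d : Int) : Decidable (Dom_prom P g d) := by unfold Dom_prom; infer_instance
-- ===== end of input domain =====

-- B replaces A's memoized top-down recursion and flag-driven while-loop by a bottom-up DP
-- table folded from the right plus a choices-then-filter reconstruction: a different
-- decomposition, no speed claim.

-- ===== PORT A =====
-- P[i] for 0 ≤ i < len(P): exact via getD on the admitted (in-range) indices
def pyAt (P : List Int) (i : Nat) : Int := P.getD i 0

-- F[i][g][d] = v (the memo table as a pointwise-updated function; keys in range on Pre_)
def updF (F : Nat → Int → Int → Int) (i : Nat) (g d v : Int) : Nat → Int → Int → Int :=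
  fun i' g' d' => if i' = i ∧ g' = g ∧ d' = d then v else F i' g' d'

-- rec_prom, returning (value, memo table after the call); the fuel argument is P.length - i,
-- so fuel 0 is exactly Python's 'i == len(P)' base case (i only ever increases by 1)
def recAgo (P : List Int) :
    Nat → (Nat → Int → Int → Int) → Int → Int → Nat → Int × (Nat → Int → Int → Int)
  | 0, F, _, _, _ => (0, F)
  | k + 1, F, g, d, i =>
    let p := pyAt P i
    if g < p ∧ d < p then (0, updF F i g d 0)
    else if F i g d ≠ -1 then (F i g d, F)
    else if p > g then
      let r := recAgo P k F g (d - p) (i + 1)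
      (r.1 + 1, updF r.2 i g d (r.1 + 1))
    else if p > d then
      let r := recAgo P k F (g - p) d (i + 1)
      (r.1 + 1, updF r.2 i g d (r.1 + 1))
    else
      let r1 := recAgo P k F (g - p) d (i + 1)
      let r2 := recAgo P k r1.2 g (d - p) (i + 1)
      (max r1.1 r2.1 + 1, updF r2.2 i g d (max r1.1 r2.1 + 1))

def recA (P : List Int) (F : Nat → Int → Int → Int) (g d : Int) (i : Nat) :
    Int × (Nat → Int → Int → Int) :=
  recAgo P (P.length - i) F g d i

-- A's reconstruction while-loop (calls rec_prom on the live memo); fuel = P.length - i again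
def loopAgo (P : List Int) (count : Int) :
    Nat → Nat → Int → Int → List Int → List Int → Int → (Nat → Int → Int → Int) → List Int
  | 0, _, _, _, bg, bd, flag, _ => if flag ≠ 0 then bd else bg
  | k + 1, i, a, b, bg, bd, flag, F =>
    let p := pyAt P i
    if a ≥ p ∨ p ≤ b then
      let t : Int × Int × (Nat → Int → Int → Int) :=
        if a < p then (0, 1, F)
        else if b < p then (1, 0, F)
        else
          let r1 := recA P F (a - p) b (i + 1)
          let r2 := recA P r1.2 a (b - p) (i + 1)
          (r1.1, r2.1, r2.2)
      if t.1 > t.2.1 then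
        loopAgo P count k (i + 1) (a - p) b (bg ++ [(i : Int)]) bd
          (if (i : Int) = count - 1 then 0 else flag) t.2.2
      else
        loopAgo P count k (i + 1) a (b - p) bg (bd ++ [(i : Int)])
          (if (i : Int) = count - 1 then 1 else flag) t.2.2
    else if flag ≠ 0 then bd else bg

def prom (P : List Int) (g : Int) (d : Int) : List Int :=
  let r := recA P (fun _ _ _ => -1) g d 0
  loopAgo P r.1 P.length 0 g d [] [] (-1) r.2

-- ===== PORT B =====
-- nxt[a][b] and F[i][a][b] (indices in range on Pre_)
def get2 (m : List (List Int)) (a b : Nat) : Int := (m.getD a []).getD b 0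

def get3 (F : List (List (List Int))) (i a b : Nat) : Int := get2 (F.getD i []) a b

-- one cell: opts = reachable subvalues; max(opts)+1 if opts else 0
def cellB (p : Int) (nxt : List (List Int)) (a b : Nat) : Int :=
  let opts :=
    (if p ≤ (a : Int) then [get2 nxt ((a : Int) - p).toNat b] else []) ++
    (if p ≤ (b : Int) then [get2 nxt a ((b : Int) - p).toNat] else [])
  match opts with
  | [] => 0
  | x :: xs => xs.foldl max x + 1

def mkRowB (g d p : Int) (nxt : List (List Int)) : List (List Int) :=
  (List.range (g + 1).toNat).map (fun a => (List.range (d + 1).toNat).map (fun b => cellB p nxt a b))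

-- 'for p in reversed(P): … F.insert(0, row)' starting from the all-zeros row = a right fold
def buildB (P : List Int) (g d : Int) : List (List (List Int)) :=
  P.foldr (fun p rest => mkRowB g d p (rest.headD []) :: rest)
    [List.replicate (g + 1).toNat (List.replicate (d + 1).toNat 0)]

-- the while-loop recording (i, take_g) choices; fuel = P.length - i
def choicesB (P : List Int) (F : List (List (List Int))) :
    Nat → Nat → Int → Int → List (Nat × Bool)
  | 0, _, _, _ => []
  | k + 1, i, a, b =>
    let p := pyAt P i
    if a ≥ p ∨ p ≤ b then
      let tg : Bool := decide (a ≥ p) &&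
        (decide (b < p) ||
         decide (get3 F (i + 1) ((a - p).toNat) b.toNat > get3 F (i + 1) a.toNat ((b - p).toNat)))
      if tg then (i, true) :: choicesB P F k (i + 1) (a - p) b
      else (i, false) :: choicesB P F k (i + 1) a (b - p)
    else []

def prom_alt (P : List Int) (g : Int) (d : Int) : List Int :=
  let F := buildB P g d
  let count := get3 F 0 g.toNat d.toNat
  let ch := choicesB P F P.length 0 g d
  if ch.any (fun c => decide ((c.1 : Int) = count - 1) && c.2) then
    (ch.filter (fun c => c.2)).map (fun c => (c.1 : Int))
  else
    (ch.filter (fun c => !c.2)).map (fun c => (c.1 : Int))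

-- ===== PRECONDITION & SPEC =====
-- Pre_ restricts to the two-bin knapsack's natural domain (nonnegative capacities and item
-- sizes): outside it A indexes its tables with negative/overflowing indices, so it sometimes
-- raises IndexError and sometimes returns an accidental value of Python's negative-index
-- wraparound (e.g. A returns [] on ([], -1, -1) and [0] on ([-1], 0, 0)), while B raises there.
def Pre_prom (P : List Int) (g : Int) (d : Int) : Prop :=
  0 ≤ g ∧ 0 ≤ d ∧ ∀ p ∈ P, 0 ≤ p
instance (P : List Int) (g : Int) (d : Int) : Decidable (Pre_prom P g d) := by
  unfold Pre_prom; infer_instance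

def pvWitness_prom : List Int × Int × Int := ([2, 3, 1], 4, 3)

def Spec_prom (P : List Int) (g : Int) (d : Int) (out : List Int) : Prop := out = prom_alt P g d
instance (P : List Int) (g : Int) (d : Int) (out : List Int) : Decidable (Spec_prom P g d out) := by
  unfold Spec_prom; infer_instance

-- ===== CLAIM (what is proved, stated in full; the proofs are below) =====
def Claim_equal_prom : Prop := ∀ (P : List Int) (g : Int) (d : Int),
  Dom_prom P g d → Pre_prom P g d → Spec_prom P g d (prom P g d)

-- ===== LEMMAS AND PROOFS =====
-- the pure value function both programs compute
def V (P : List Int) (g d : Int) (i : Nat) : Int :=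
  if h : i < P.length then
    let p := pyAt P i
    if g < p ∧ d < p then 0
    else if p > g then V P g (d - p) (i + 1) + 1
    else if p > d then V P (g - p) d (i + 1) + 1
    else max (V P (g - p) d (i + 1)) (V P g (d - p) (i + 1)) + 1
  else 0
termination_by P.length - i

-- memo invariant: every filled cell holds the pure value
def InvM (P : List Int) (F : Nat → Int → Int → Int) : Prop :=
  ∀ i g d, F i g d ≠ -1 → F i g d = V P g d i

lemma InvM_updF {P : List Int} {F : Nat → Int → Int → Int} {i : Nat} {g d v : Int}
    (hF : InvM P F) (hv : v = V P g d i) : InvM P (updF F i g d v) := by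
  intro i' g' d' h
  unfold updF at *
  by_cases hc : i' = i ∧ g' = g ∧ d' = d
  · obtain ⟨h1, h2, h3⟩ := hc; subst h1; subst h2; subst h3
    rw [if_pos ⟨rfl, rfl, rfl⟩]
    exact hv
  · rw [if_neg hc] at h ⊢
    exact hF _ _ _ h

theorem recAgo_correct (P : List Int) (k : Nat) (F : Nat → Int → Int → Int) (g d : Int)
    (i : Nat) : P.length = i + k → InvM P F →
    (recAgo P k F g d i).1 = V P g d i ∧ InvM P (recAgo P k F g d i).2 := by
  fun_induction recAgo P k F g d i with
  | case1 F g d i =>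
    intro hk hF
    have hv : V P g d i = 0 := by rw [V]; simp only [dif_neg (by omega : ¬ i < P.length)]
    exact ⟨hv.symm, hF⟩
  | case2 k F g d i p hsmall =>
    intro hk hF
    have h : i < P.length := by omega
    have hv : V P g d i = 0 := by
      rw [V]; simp only [dif_pos h]; rw [if_pos hsmall]
    exact ⟨hv.symm, InvM_updF hF hv.symm⟩
  | case3 k F g d i p hsmall hmemo =>
    intro hk hF
    exact ⟨hF i g d hmemo, hF⟩
  | case4 k F g d i p hsmall hmemo hpg r ih =>
    intro hk hF
    have h : i < P.length := by omega
    obtain ⟨ih1, ih2⟩ := ih (by omega) hF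
    have hv : V P g d i = (recAgo P k F g (d - pyAt P i) (i + 1)).1 + 1 := by
      rw [V]; simp only [dif_pos h]; rw [if_neg hsmall, if_pos hpg, ih1]
    exact ⟨hv.symm, InvM_updF ih2 hv.symm⟩
  | case5 k F g d i p hsmall hmemo hpg hpd r ih =>
    intro hk hF
    have h : i < P.length := by omega
    obtain ⟨ih1, ih2⟩ := ih (by omega) hF
    have hv : V P g d i = (recAgo P k F (g - pyAt P i) d (i + 1)).1 + 1 := by
      rw [V]; simp only [dif_pos h]; rw [if_neg hsmall, if_neg hpg, if_pos hpd, ih1]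
    exact ⟨hv.symm, InvM_updF ih2 hv.symm⟩
  | case6 k F g d i p hsmall hmemo hpg hpd r1 r2 iha ihb =>
    intro hk hF
    have h : i < P.length := by omega
    obtain ⟨ha1, ha2⟩ := iha (by omega) hF
    obtain ⟨hb1, hb2⟩ := ihb (by omega) ha2
    have hv : V P g d i =
        max (recAgo P k F (g - pyAt P i) d (i + 1)).1
          ((recAgo P k (recAgo P k F (g - pyAt P i) d (i + 1)).2 g (d - pyAt P i) (i + 1)).1) + 1 := by
      rw [V]; simp only [dif_pos h]; rw [if_neg hsmall, if_neg hpg, if_neg hpd, ha1, hb1]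
    exact ⟨hv.symm, InvM_updF hb2 hv.symm⟩

theorem recA_correct (P : List Int) (F : Nat → Int → Int → Int) (g d : Int) (i : Nat)
    (hi : i ≤ P.length) : InvM P F →
    (recA P F g d i).1 = V P g d i ∧ InvM P (recA P F g d i).2 :=
  recAgo_correct P (P.length - i) F g d i (by omega)

lemma get2_map_range {g d : Int} (f : Nat → Nat → Int) (a b : Nat)
    (ha : (a : Int) ≤ g) (hb : (b : Int) ≤ d) :
    get2 ((List.range (g + 1).toNat).map (fun (x : Nat) =>
      (List.range (d + 1).toNat).map (fun (y : Nat) => f x y))) a b = f a b := by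
  have ha' : a < (g + 1).toNat := Int.lt_toNat.mpr (by omega)
  have hb' : b < (d + 1).toNat := Int.lt_toNat.mpr (by omega)
  simp [get2, List.getD_eq_getElem?_getD, ha', hb']

lemma get2_mkRowB {g d : Int} (p : Int) (nxt : List (List Int)) (a b : Nat)
    (ha : (a : Int) ≤ g) (hb : (b : Int) ≤ d) :
    get2 (mkRowB g d p nxt) a b = cellB p nxt a b :=
  get2_map_range (fun x y => cellB p nxt x y) a b ha hb

lemma cellB_ok {P : List Int} {g d : Int} {i : Nat} (hi : i < P.length)
    (hp : 0 ≤ pyAt P i) {nxt : List (List Int)}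
    (hnxt : ∀ a b : Nat, (a : Int) ≤ g → (b : Int) ≤ d → get2 nxt a b = V P a b (i + 1)) :
    ∀ a b : Nat, (a : Int) ≤ g → (b : Int) ≤ d → cellB (pyAt P i) nxt a b = V P a b i := by
  intro a b ha hb
  unfold cellB
  rw [V]; simp only [dif_pos hi]
  set p := pyAt P i with hpdef
  have e1 : p ≤ (a : Int) → get2 nxt ((a : Int) - p).toNat b = V P ((a : Int) - p) b (i + 1) := by
    intro h
    have := hnxt ((a : Int) - p).toNat b (by rw [Int.toNat_of_nonneg (by omega)]; omega) hb
    rwa [Int.toNat_of_nonneg (by omega)] at this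
  have e2 : p ≤ (b : Int) → get2 nxt a ((b : Int) - p).toNat = V P a ((b : Int) - p) (i + 1) := by
    intro h
    have := hnxt a ((b : Int) - p).toNat ha (by rw [Int.toNat_of_nonneg (by omega)]; omega)
    rwa [Int.toNat_of_nonneg (by omega)] at this
  by_cases h1 : p ≤ (a : Int)
  · by_cases h2 : p ≤ (b : Int)
    · rw [if_pos h1, if_pos h2]
      rw [if_neg (by omega : ¬ ((a : Int) < p ∧ (b : Int) < p)),
        if_neg (by omega : ¬ p > (a : Int)), if_neg (by omega : ¬ p > (b : Int))]
      simp only [List.cons_append, List.nil_append, List.foldl]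
      rw [e1 h1, e2 h2]
    · rw [if_pos h1, if_neg h2]
      rw [if_neg (by omega : ¬ ((a : Int) < p ∧ (b : Int) < p)),
        if_neg (by omega : ¬ p > (a : Int)), if_pos (by omega : p > (b : Int))]
      simp only [List.append_nil, List.foldl]
      rw [e1 h1]
  · by_cases h2 : p ≤ (b : Int)
    · rw [if_neg h1, if_pos h2]
      rw [if_neg (by omega : ¬ ((a : Int) < p ∧ (b : Int) < p)),
        if_pos (by omega : p > (a : Int))]
      simp only [List.nil_append, List.foldl]
      rw [e2 h2]
    · rw [if_neg h1, if_neg h2]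
      rw [if_pos (by constructor <;> omega : (a : Int) < p ∧ (b : Int) < p)]
      rfl

lemma headD_eq_getD {α : Type} (l : List α) (x : α) : l.headD x = l.getD 0 x := by
  cases l <;> rfl

-- correctness of the folded table: row j holds V at index j
theorem buildB_aux (P : List Int) (g d : Int) (hP : ∀ p ∈ P, 0 ≤ p) :
    ∀ (Q : List Int) (i : Nat), P.drop i = Q →
      ∀ (j : Nat), j ≤ Q.length →
      ∀ (a b : Nat), (a : Int) ≤ g → (b : Int) ≤ d →
        get2 ((Q.foldr (fun p rest => mkRowB g d p (rest.headD []) :: rest)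
          [List.replicate (g + 1).toNat (List.replicate (d + 1).toNat 0)]).getD j []) a b
          = V P a b (i + j) := by
  intro Q
  induction Q with
  | nil =>
    intro i hQ j hj a b ha hb
    have hj0 : j = 0 := Nat.le_zero.mp (by simpa using hj)
    subst hj0
    have hi : P.length ≤ i := by
      have := congrArg List.length hQ
      simp at this
      omega
    simp only [List.foldr, List.getD_cons_zero]
    have hz : get2 (List.replicate (g + 1).toNat (List.replicate (d + 1).toNat 0)) a b = 0 := by
      simp [get2, List.getD_eq_getElem?_getD]
      by_cases h1 : a < (g + 1).toNat <;> by_cases h2 : b < (d + 1).toNat <;>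
        simp [h1, h2]
    rw [hz, V]
    simp only [dif_neg (by omega : ¬ i + 0 < P.length)]
  | cons p Q' ih =>
    intro i hQ j hj a b ha hb
    have hi : i < P.length := by
      by_contra h
      rw [List.drop_eq_nil_of_le (by omega)] at hQ; simp at hQ
    have hcons := List.drop_eq_getElem_cons hi
    rw [hQ] at hcons
    have hp : p = pyAt P i := by
      injection hcons with h1 _
      rw [h1]; exact (List.getD_eq_getElem P 0 hi).symm
    have hQ' : P.drop (i + 1) = Q' := by
      injection hcons with _ h2; exact h2.symm
    cases j with
    | zero =>
      simp only [List.foldr, List.getD_cons_zero]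
      rw [hp]
      have hmem : pyAt P i ∈ P := by
        have : pyAt P i = P[i] := List.getD_eq_getElem P 0 hi
        rw [this]; exact List.getElem_mem hi
      have hnxt : ∀ a' b' : Nat, (a' : Int) ≤ g → (b' : Int) ≤ d →
          get2 ((Q'.foldr (fun p rest => mkRowB g d p (rest.headD []) :: rest)
            [List.replicate (g + 1).toNat (List.replicate (d + 1).toNat 0)]).headD []) a' b'
            = V P a' b' (i + 1) := by
        intro a' b' ha' hb'
        have := ih (i + 1) hQ' 0 (by simp) a' b' ha' hb'
        rw [headD_eq_getD]
        simpa using this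
      rw [get2_mkRowB (pyAt P i) _ a b ha hb]
      exact cellB_ok hi (hP _ hmem) hnxt a b ha hb
    | succ j =>
      simp only [List.foldr, List.getD_cons_succ]
      have := ih (i + 1) hQ' j (by simp at hj; omega) a b ha hb
      rw [show i + 1 + j = i + (j + 1) by omega] at this
      exact this

theorem buildB_ok (P : List Int) (g d : Int) (hP : ∀ p ∈ P, 0 ≤ p) :
    ∀ (j : Nat), j ≤ P.length → ∀ (a b : Nat), (a : Int) ≤ g → (b : Int) ≤ d →
      get3 (buildB P g d) j a b = V P a b j := by
  intro j hj a b ha hb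
  have := buildB_aux P g d hP P 0 (by simp) j (by omega) a b ha hb
  simpa [get3, buildB] using this

-- the final flag after processing a choice list, and the selection it induces
def flagAfter (count : Int) : Int → List (Nat × Bool) → Int
  | flag, [] => flag
  | flag, c :: ch =>
    flagAfter count (if (c.1 : Int) = count - 1 then (if c.2 then 0 else 1) else flag) ch

-- A's loop equals: record B's choices, then select by the final flag
theorem loop_choices (P : List Int) (g d : Int) (hP : ∀ p ∈ P, 0 ≤ p) (count : Int) :
    ∀ (k i : Nat), P.length = i + k →
      ∀ (a b : Int) (bg bd : List Int) (flag : Int) (Fm : Nat → Int → Int → Int),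
        InvM P Fm → 0 ≤ a → a ≤ g → 0 ≤ b → b ≤ d →
        loopAgo P count k i a b bg bd flag Fm =
          (let ch := choicesB P (buildB P g d) k i a b
           if flagAfter count flag ch ≠ 0 then
             bd ++ (ch.filter (fun c => !c.2)).map (fun c => (c.1 : Int))
           else
             bg ++ (ch.filter (fun c => c.2)).map (fun c => (c.1 : Int))) := by
  intro k
  induction k with
  | zero =>
    intro i hk a b bg bd flag Fm hF h0a hag h0b hbd
    simp [loopAgo, choicesB, flagAfter]
  | succ k ih =>
    intro i hk a b bg bd flag Fm hF h0a hag h0b hbd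
    have h : i < P.length := by omega
    have hp : 0 ≤ pyAt P i := hP _ (by
      have : pyAt P i = P[i] := List.getD_eq_getElem P 0 h
      rw [this]; exact List.getElem_mem h)
    simp only [loopAgo, choicesB]
    set p := pyAt P i with hpdef
    by_cases hcond : a ≥ p ∨ p ≤ b
    · rw [if_pos hcond, if_pos hcond]
      obtain ⟨e1, hF1⟩ := recA_correct P Fm (a - p) b (i + 1) (by omega) hF
      obtain ⟨e2, hF2⟩ := recA_correct P (recA P Fm (a - p) b (i + 1)).2 a (b - p) (i + 1) (by omega) hF1
      by_cases h1 : a < p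
      · -- A: p1=0,p2=1 → d-branch; B: take_g = false
        rw [if_pos h1]
        have htg : (decide (a ≥ p) &&
            (decide (b < p) ||
             decide (get3 (buildB P g d) (i + 1) ((a - p).toNat) b.toNat >
               get3 (buildB P g d) (i + 1) a.toNat ((b - p).toNat)))) = false := by
          simp [decide_eq_false (by omega : ¬ a ≥ p)]
        rw [htg]
        have hbp : p ≤ b := by rcases hcond with hc | hc <;> omega
        simp only [show ¬ ((0:Int) > 1) by norm_num, if_false]
        rw [ih (i + 1) (by omega) a (b - p) bg (bd ++ [(i : Int)])
          (if (i : Int) = count - 1 then 1 else flag) Fm hF h0a hag (by omega) (by omega)]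
        simp [flagAfter, List.append_assoc]
      · have hap : p ≤ a := by omega
        by_cases h2 : b < p
        · -- A: p1=1,p2=0 → g-branch; B: take_g = true
          rw [if_neg h1, if_pos h2]
          have htg : (decide (a ≥ p) &&
              (decide (b < p) ||
               decide (get3 (buildB P g d) (i + 1) ((a - p).toNat) b.toNat >
                 get3 (buildB P g d) (i + 1) a.toNat ((b - p).toNat)))) = true := by
            simp [decide_eq_true (by omega : a ≥ p), decide_eq_true h2]
          rw [htg]
          simp only [show ((1:Int) > 0) by norm_num, if_true]
          rw [ih (i + 1) (by omega) (a - p) b (bg ++ [(i : Int)]) bd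
            (if (i : Int) = count - 1 then 0 else flag) Fm hF (by omega) (by omega) h0b hbd]
          simp [flagAfter, List.append_assoc]
        · -- both fit: compare V values
          rw [if_neg h1, if_neg h2]
          have hbp : p ≤ b := by omega
          have t1 : get3 (buildB P g d) (i + 1) (a - p).toNat b.toNat = V P (a - p) b (i + 1) := by
            have := buildB_ok P g d hP (i + 1) (by omega) (a - p).toNat b.toNat
              (by rw [Int.toNat_of_nonneg (by omega)]; omega)
              (by rw [Int.toNat_of_nonneg h0b]; omega)
            rwa [Int.toNat_of_nonneg (by omega), Int.toNat_of_nonneg h0b] at this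
          have t2 : get3 (buildB P g d) (i + 1) a.toNat (b - p).toNat = V P a (b - p) (i + 1) := by
            have := buildB_ok P g d hP (i + 1) (by omega) a.toNat (b - p).toNat
              (by rw [Int.toNat_of_nonneg h0a]; omega)
              (by rw [Int.toNat_of_nonneg (by omega)]; omega)
            rwa [Int.toNat_of_nonneg h0a, Int.toNat_of_nonneg (by omega)] at this
          have htg : (decide (a ≥ p) &&
              (decide (b < p) ||
               decide (get3 (buildB P g d) (i + 1) ((a - p).toNat) b.toNat >
                 get3 (buildB P g d) (i + 1) a.toNat ((b - p).toNat)))) =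
              decide (V P (a - p) b (i + 1) > V P a (b - p) (i + 1)) := by
            rw [t1, t2]
            simp [decide_eq_true (by omega : a ≥ p), decide_eq_false (by omega : ¬ b < p)]
          rw [htg]
          simp only [e1, e2]
          by_cases hgt : V P (a - p) b (i + 1) > V P a (b - p) (i + 1)
          · rw [if_pos hgt,
              if_pos (show (decide (V P (a - p) b (i + 1) > V P a (b - p) (i + 1))) = true from
                decide_eq_true hgt)]
            rw [ih (i + 1) (by omega) (a - p) b (bg ++ [(i : Int)]) bd
              (if (i : Int) = count - 1 then 0 else flag) _ hF2 (by omega) (by omega) h0b hbd]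
            simp [flagAfter, List.append_assoc]
          · rw [if_neg hgt,
              if_neg (show ¬ ((decide (V P (a - p) b (i + 1) > V P a (b - p) (i + 1))) = true) by
                simp [hgt])]
            rw [ih (i + 1) (by omega) a (b - p) bg (bd ++ [(i : Int)])
              (if (i : Int) = count - 1 then 1 else flag) _ hF2 h0a hag (by omega) (by omega)]
            simp [flagAfter, List.append_assoc]
    · rw [if_neg hcond, if_neg hcond]
      simp [flagAfter]
  -- note: 'let ch := …' in the statement is definitionally transparent

-- every recorded index is ≥ the starting index
lemma choicesB_lb (P : List Int) (F : List (List (List Int))) :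
    ∀ (k i : Nat) (a b : Int), ∀ c ∈ choicesB P F k i a b, i ≤ c.1 := by
  intro k
  induction k with
  | zero => intro i a b c hc; simp [choicesB] at hc
  | succ k ih =>
    intro i a b c hc
    simp only [choicesB] at hc
    split_ifs at hc with h1 h2
    · rcases List.mem_cons.mp hc with rfl | hc
      · exact le_refl _
      · exact le_of_lt (Nat.lt_of_lt_of_le (Nat.lt_succ_self i) (ih (i + 1) _ _ c hc))
    · rcases List.mem_cons.mp hc with rfl | hc
      · exact le_refl _
      · exact le_of_lt (Nat.lt_of_lt_of_le (Nat.lt_succ_self i) (ih (i + 1) _ _ c hc))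
    · simp at hc

-- flagAfter is unchanged, and B's any-test is false, on a stretch with no matching index
lemma flagAfter_nomatch (count : Int) :
    ∀ (ch : List (Nat × Bool)) (flag : Int),
      (∀ c ∈ ch, ¬ ((c.1 : Int) = count - 1)) → flagAfter count flag ch = flag := by
  intro ch
  induction ch with
  | nil => intro flag _; rfl
  | cons c ch' ih =>
    intro flag hn
    simp only [flagAfter, if_neg (hn c List.mem_cons_self)]
    exact ih flag (fun c hc => hn c (List.mem_cons_of_mem _ hc))

lemma any_nomatch (count : Int) (ch : List (Nat × Bool))
    (hn : ∀ c ∈ ch, ¬ ((c.1 : Int) = count - 1)) :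
    (ch.any fun c => decide ((c.1 : Int) = count - 1) && c.2) = false := by
  simp only [List.any_eq_false]
  intro c hc
  simp [hn c hc]

-- flagAfter-selection with initial flag -1 equals B's any-selection
lemma flag_any (P : List Int) (F : List (List (List Int))) (count : Int) :
    ∀ (k i : Nat) (a b : Int) (flag : Int), flag ≠ 0 →
      ((flagAfter count flag (choicesB P F k i a b) = 0) ↔
        ((choicesB P F k i a b).any (fun c => decide ((c.1 : Int) = count - 1) && c.2) = true)) := by
  intro k
  induction k with
  | zero => intro i a b flag hflag; simp [choicesB, flagAfter, hflag]
  | succ k ih =>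
    intro i a b flag hflag
    simp only [choicesB]
    split_ifs with h1 h2
    · -- head (i, true)
      by_cases hm : (i : Int) = count - 1
      · have hn : ∀ c ∈ choicesB P F k (i + 1) (a - pyAt P i) b, ¬ ((c.1 : Int) = count - 1) := by
          intro c hc
          have := choicesB_lb P F k (i + 1) (a - pyAt P i) b c hc
          omega
        simp only [flagAfter, if_pos hm, List.any_cons]
        rw [flagAfter_nomatch count _ _ hn, any_nomatch count _ hn]
        simp [hm]
      · simp only [flagAfter, if_neg hm, List.any_cons]
        rw [ih (i + 1) (a - pyAt P i) b flag hflag]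
        simp [hm]
    · -- head (i, false)
      by_cases hm : (i : Int) = count - 1
      · have hn : ∀ c ∈ choicesB P F k (i + 1) a (b - pyAt P i), ¬ ((c.1 : Int) = count - 1) := by
          intro c hc
          have := choicesB_lb P F k (i + 1) a (b - pyAt P i) c hc
          omega
        simp only [flagAfter, if_pos hm, List.any_cons]
        rw [flagAfter_nomatch count _ _ hn, any_nomatch count _ hn]
        simp
      · simp only [flagAfter, if_neg hm, List.any_cons]
        rw [ih (i + 1) a (b - pyAt P i) flag hflag]
        simp [hm]
    · simp [flagAfter, hflag]

theorem prom_eq (P : List Int) (g d : Int) (hg : 0 ≤ g) (hd : 0 ≤ d)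
    (hP : ∀ p ∈ P, 0 ≤ p) : prom P g d = prom_alt P g d := by
  have hF0 : InvM P (fun _ _ _ => (-1 : Int)) := fun i g d h => absurd rfl h
  obtain ⟨e0, hF1⟩ := recA_correct P (fun _ _ _ => -1) g d 0 (by omega) hF0
  have hcount : get3 (buildB P g d) 0 g.toNat d.toNat = V P g d 0 := by
    have := buildB_ok P g d hP 0 (by omega) g.toNat d.toNat
      (by rw [Int.toNat_of_nonneg hg]) (by rw [Int.toNat_of_nonneg hd])
    rwa [Int.toNat_of_nonneg hg, Int.toNat_of_nonneg hd] at this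
  show loopAgo P (recA P (fun _ _ _ => -1) g d 0).1 P.length 0 g d [] [] (-1)
        (recA P (fun _ _ _ => -1) g d 0).2 = prom_alt P g d
  rw [e0]
  rw [loop_choices P g d hP (V P g d 0) P.length 0 (by omega) g d [] [] (-1) _ hF1 hg le_rfl hd le_rfl]
  unfold prom_alt
  simp only [hcount]
  by_cases hsel : flagAfter (V P g d 0) (-1) (choicesB P (buildB P g d) P.length 0 g d) = 0
  · have h2 := (flag_any P (buildB P g d) (V P g d 0) P.length 0 g d (-1) (by norm_num)).mp hsel
    rw [if_neg (show ¬ (flagAfter (V P g d 0) (-1)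
        (choicesB P (buildB P g d) P.length 0 g d) ≠ 0) from fun hh => hh hsel),
      if_pos h2]
    simp
  · have h2 : ¬ (((choicesB P (buildB P g d) P.length 0 g d).any
        (fun c => decide ((c.1 : Int) = V P g d 0 - 1) && c.2)) = true) :=
      fun hany => hsel ((flag_any P (buildB P g d) (V P g d 0) P.length 0 g d (-1)
        (by norm_num)).mpr hany)
    rw [if_pos hsel, if_neg h2]
    simp

-- ===== VERDICT (by name: the statement is the Claim_ definition above) =====
theorem prom_spec : Claim_equal_prom := by
  intro P g d _ hpre
  exact prom_eq P g d hpre.1 hpre.2.1 hpre.2.2
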